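-- pv_equiv track=rewrite | github.com/M-ac-i-ej-s/university-archives | krypto/cezar.py | find_number_of_encryption_a
-- ===== SOURCE A (Python) =====
-- def decrypt_text_a(encrypted_message, a, b):
--     letters="abcdefghijklmnopqrstuvwxyzABCDEFGHIJKLMNOPQRSTUVWXYZ"
--     decrypted_message = ""
--     for ch in encrypted_message:
--         if ch in letters:
--             position = letters.find(ch)
--             new_pos = (position - int(b)) * int(a) % 26
--             new_char = letters[new_pos]
--             decrypted_message += new_char
--         else:
--             decrypted_message += ch
--     return decrypted_message
--
-- def find_number_of_encryption_a(encrypted_message, decrypted_message):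
--     number_of_encryption = []
--     for i in range(0, 100):
--         for k in range(0, 100):
--             decrypted_message = decrypt_text_a(encrypted_message, i,k)
--             if decrypted_message == encrypted_message:
--                 number_of_encryption = [i,k]
--     return number_of_encryption
-- ===== SOURCE B (Python) =====
-- def find_number_of_encryption_a(encrypted_message, decrypted_message):
--     letters = "abcdefghijklmnopqrstuvwxyzABCDEFGHIJKLMNOPQRSTUVWXYZ"
--     residues = {letters.find(ch) for ch in encrypted_message if ch in letters}
--     for i in range(99, -1, -1):
--         for k in range(99, -1, -1):
--             if all((p - k) * i % 26 == p for p in residues):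
--                 return [i, k]
--     return []
-- ===== Notes on version B (the rewrite author's own statement) =====
-- stated objective: faster
-- what changed: B scans the message once to collect the set of distinct letter residues and then runs the 100x100 pair search in reverse with an early exit, testing each pair against that small set instead of re-decrypting and rebuilding the whole message 10000 times.
import Mathlib
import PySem

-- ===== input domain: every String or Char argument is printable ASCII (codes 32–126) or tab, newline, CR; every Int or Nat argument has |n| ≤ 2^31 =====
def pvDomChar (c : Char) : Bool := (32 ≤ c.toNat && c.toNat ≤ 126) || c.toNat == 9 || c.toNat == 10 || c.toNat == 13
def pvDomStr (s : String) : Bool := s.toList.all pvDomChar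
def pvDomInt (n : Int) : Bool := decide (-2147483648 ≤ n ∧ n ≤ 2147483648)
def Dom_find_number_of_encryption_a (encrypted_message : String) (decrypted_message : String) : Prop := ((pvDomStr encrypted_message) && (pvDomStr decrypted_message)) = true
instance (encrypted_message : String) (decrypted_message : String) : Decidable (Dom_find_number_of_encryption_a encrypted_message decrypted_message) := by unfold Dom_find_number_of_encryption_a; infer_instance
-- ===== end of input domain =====

-- B replaces the per-pair whole-message decrypt-and-compare by a one-pass precomputed set of
-- distinct letter residues and a reversed early-exit search (objective: faster on long messages).
-- A rebinds its `decrypted_message` parameter internally; neither argument is mutated observably.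

-- ===== PORT A =====
def pvLetters : List Char := "abcdefghijklmnopqrstuvwxyzABCDEFGHIJKLMNOPQRSTUVWXYZ".toList

def decrypt_text_a (encrypted_message : List Char) (a : Int) (b : Int) : List Char :=
  encrypted_message.foldl (fun decrypted ch =>
    if PySem.Chars.isIn [ch] pvLetters then
      -- new_pos = (position - b) * a % 26 is always in [0, 26), so letters[new_pos] never raises
      decrypted ++ [(PySem.List.pyGet? pvLetters
        (PySem.Int.mod ((PySem.Chars.find pvLetters [ch] - b) * a) 26)).getD ch]
    else decrypted ++ [ch]) []

def find_number_of_encryption_a (encrypted_message : String) (decrypted_message : String) : List Int :=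
  (PySem.List.pyRange 0 100 1).foldl (fun acc i =>
    (PySem.List.pyRange 0 100 1).foldl (fun acc k =>
      if decrypt_text_a encrypted_message.toList i k == encrypted_message.toList then [i, k]
      else acc) acc) []

-- ===== PORT B =====
def pvResidues (msg : List Char) : PySem.Set Int :=
  PySem.Set.ofList (msg.filterMap (fun ch =>
    if PySem.Chars.isIn [ch] pvLetters then some (PySem.Chars.find pvLetters [ch]) else none))

def find_number_of_encryption_a_alt (encrypted_message : String) (decrypted_message : String) : List Int :=
  let residues := pvResidues encrypted_message.toList
  -- nested `for i in range(99,-1,-1): for k in range(99,-1,-1): if …: return [i,k]` with early return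
  match ((PySem.List.pyRange 99 (-1) (-1)).flatMap (fun i =>
      (PySem.List.pyRange 99 (-1) (-1)).map (fun k => (i, k)))).find?
      (fun ik => residues.all (fun p => PySem.Int.mod ((p - ik.2) * ik.1) 26 == p)) with
  | some ik => [ik.1, ik.2]
  | none => []

-- ===== PRECONDITION & SPEC =====
def Spec_find_number_of_encryption_a (encrypted_message : String) (decrypted_message : String) (out : List Int) : Prop := out = find_number_of_encryption_a_alt encrypted_message decrypted_message
instance (encrypted_message : String) (decrypted_message : String) (out : List Int) : Decidable (Spec_find_number_of_encryption_a encrypted_message decrypted_message out) := by unfold Spec_find_number_of_encryption_a; infer_instance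

-- ===== CLAIM (what is proved, stated in full; the proofs are below) =====
def Claim_equal_find_number_of_encryption_a : Prop := ∀ (encrypted_message : String) (decrypted_message : String), Dom_find_number_of_encryption_a encrypted_message decrypted_message → Spec_find_number_of_encryption_a encrypted_message decrypted_message (find_number_of_encryption_a encrypted_message decrypted_message)

-- ===== LEMMAS AND PROOFS =====
lemma pv_go_singleton (c : Char) (l : List Char) (k : Nat) :
    PySem.Chars.find.go [c] l k =
      if c ∈ l then ((k + l.idxOf c : Nat) : Int) else -1 := by
  induction l generalizing k with
  | nil => simp [PySem.Chars.find.go]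
  | cons h t ih =>
    by_cases hch : c = h
    · subst hch
      simp [PySem.Chars.find.go, List.isPrefixOf, List.idxOf_cons_self]
    · have : ([c].isPrefixOf (h :: t)) = false := by
        simp [List.isPrefixOf]
        exact fun hc => absurd hc hch
      rw [PySem.Chars.find.go]
      simp only [this, Bool.false_eq_true, if_false, ih]
      by_cases hm : c ∈ t
      · simp [hm, hch, Ne.symm hch]
        omega
      · simp [hm, hch]

lemma pv_find_singleton (c : Char) (l : List Char) :
    PySem.Chars.find l [c] = if c ∈ l then (l.idxOf c : Int) else -1 := by
  have := pv_go_singleton c l 0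
  simpa [PySem.Chars.find] using this

lemma pv_isIn_singleton (c : Char) (l : List Char) :
    PySem.Chars.isIn [c] l = decide (c ∈ l) := by
  simp only [PySem.Chars.isIn, pv_find_singleton]
  by_cases hm : c ∈ l
  · simp [hm]
  · simp [hm]

lemma pv_map_eq_self_iff {α : Type} (f : α → α) (l : List α) :
    l.map f = l ↔ ∀ c ∈ l, f c = c := by
  induction l with
  | nil => simp
  | cons h t ih => simp [ih]

-- A's per-character decryption step
def pvStep (i k : Int) (c : Char) : Char :=
  if PySem.Chars.isIn [c] pvLetters then
    (PySem.List.pyGet? pvLetters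
      (PySem.Int.mod ((PySem.Chars.find pvLetters [c] - k) * i) 26)).getD c
  else c

lemma pv_decrypt_eq_map (msg : List Char) (i k : Int) (acc : List Char) :
    msg.foldl (fun decrypted ch =>
      if PySem.Chars.isIn [ch] pvLetters then
        decrypted ++ [(PySem.List.pyGet? pvLetters
          (PySem.Int.mod ((PySem.Chars.find pvLetters [ch] - k) * i) 26)).getD ch]
      else decrypted ++ [ch]) acc = acc ++ msg.map (pvStep i k) := by
  induction msg generalizing acc with
  | nil => simp
  | cons h t ih =>
    simp only [List.foldl_cons, List.map_cons, ih]
    unfold pvStep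
    split <;> simp

lemma pv_nodup : pvLetters.Nodup := by decide

lemma pv_step_eq_self_iff (i k : Int) (c : Char) :
    pvStep i k c = c ↔
      (c ∈ pvLetters →
        PySem.Int.mod (((pvLetters.idxOf c : Int) - k) * i) 26 = (pvLetters.idxOf c : Int)) := by
  unfold pvStep
  by_cases hc : c ∈ pvLetters
  · rw [pv_isIn_singleton, pv_find_singleton, if_pos hc, if_pos (by simpa using hc), imp_iff_right hc]
    have hlen : pvLetters.length = 52 := by decide
    set np := PySem.Int.mod (((pvLetters.idxOf c : Int) - k) * i) 26 with hnp
    have h0 : 0 ≤ np := PySem.Int.mod_nonneg _ (by norm_num)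
    have h26 : np < 26 := PySem.Int.mod_lt _ (by norm_num)
    rw [PySem.List.pyGet?_eq_some_getElem pvLetters h0 (by rw [hlen]; omega)]
    have hidx : pvLetters.idxOf c < pvLetters.length := List.idxOf_lt_length_of_mem hc
    constructor
    · intro h
      have h2 : pvLetters[np.toNat]'(by omega) = pvLetters[pvLetters.idxOf c] := by
        simpa [List.getElem_idxOf hidx] using h
      have := (pv_nodup.getElem_inj_iff).mp h2
      omega
    · intro h
      have hnp' : np.toNat = pvLetters.idxOf c := by omega
      simp [hnp', List.getElem_idxOf hidx]
  · rw [pv_isIn_singleton]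
    simp [hc]

lemma pv_match_iff (msg : List Char) (i k : Int) :
    (decrypt_text_a msg i k == msg) =
      (pvResidues msg).all (fun p => PySem.Int.mod ((p - k) * i) 26 == p) := by
  rw [Bool.eq_iff_iff]
  unfold decrypt_text_a
  rw [beq_iff_eq, pv_decrypt_eq_map, List.nil_append, pv_map_eq_self_iff]
  rw [List.all_eq_true]
  constructor
  · intro h p hp
    rw [pvResidues, PySem.Set.mem_ofList, List.mem_filterMap] at hp
    obtain ⟨c, hcm, hcp⟩ := hp
    rw [pv_isIn_singleton] at hcp
    by_cases hc : c ∈ pvLetters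
    · simp only [hc, decide_true, if_true, Option.some.injEq] at hcp
      rw [pv_find_singleton, if_pos hc] at hcp
      have := (pv_step_eq_self_iff i k c).mp (h c hcm) hc
      subst hcp
      simpa using this
    · simp [hc] at hcp
  · intro h c hcm
    rw [pv_step_eq_self_iff]
    intro hc
    have hp : (pvLetters.idxOf c : Int) ∈ pvResidues msg := by
      rw [pvResidues, PySem.Set.mem_ofList, List.mem_filterMap]
      exact ⟨c, hcm, by rw [pv_isIn_singleton, pv_find_singleton]; simp [hc]⟩
    simpa using h _ hp

lemma pv_last_fold {α β : Type} (p : α → Bool) (f : α → β) (L : List α) (init : β) :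
    L.foldl (fun acc x => if p x then f x else acc) init =
      (match L.reverse.find? p with
       | some x => f x
       | none => init) := by
  induction L generalizing init with
  | nil => simp
  | cons h t ih =>
    simp only [List.foldl_cons, List.reverse_cons, List.find?_append, ih]
    cases hf : t.reverse.find? p with
    | some x => simp
    | none =>
      simp only [Option.none_or]
      cases hp : p h <;> simp [List.find?, hp]

lemma pv_alt_unfold (enc dec : String) :
    find_number_of_encryption_a_alt enc dec =
      (match ((PySem.List.pyRange 99 (-1) (-1)).flatMap (fun i =>
          (PySem.List.pyRange 99 (-1) (-1)).map (fun k => (i, k)))).find?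
          (fun ik => (pvResidues enc.toList).all
            (fun p => PySem.Int.mod ((p - ik.2) * ik.1) 26 == p)) with
       | some ik => [ik.1, ik.2]
       | none => []) := rfl

theorem pv_main (enc dec : String) :
    find_number_of_encryption_a enc dec = find_number_of_encryption_a_alt enc dec := by
  have hrev : PySem.List.pyRange 99 (-1) (-1) = (PySem.List.pyRange 0 100 1).reverse := by
    have := PySem.List.pyRange_neg_one_eq_reverse 99 (-1)
    simpa using this
  have hlist :
      ((PySem.List.pyRange 99 (-1) (-1)).flatMap (fun i =>
          (PySem.List.pyRange 99 (-1) (-1)).map (fun k => (i, k)))) =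
        ((PySem.List.pyRange 0 100 1).flatMap (fun i =>
            (PySem.List.pyRange 0 100 1).map (fun k => (i, k)))).reverse := by
    rw [List.reverse_flatMap, hrev]
    simp [Function.comp_def, List.map_reverse]
  have hpred :
      (fun (ik : Int × Int) => decrypt_text_a enc.toList ik.1 ik.2 == enc.toList) =
        (fun (ik : Int × Int) =>
          (pvResidues enc.toList).all (fun p => PySem.Int.mod ((p - ik.2) * ik.1) 26 == p)) := by
    funext ik
    exact pv_match_iff enc.toList ik.1 ik.2
  have h1 :
      ((PySem.List.pyRange 0 100 1).flatMap (fun i =>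
          (PySem.List.pyRange 0 100 1).map (fun k => (i, k)))).foldl
        (fun acc ik =>
          if decrypt_text_a enc.toList ik.1 ik.2 == enc.toList then [ik.1, ik.2] else acc) []
      = find_number_of_encryption_a enc dec := by
    unfold find_number_of_encryption_a
    rw [List.foldl_flatMap]
    simp only [List.foldl_map]
  rw [← h1, pv_last_fold, hpred, pv_alt_unfold enc dec, hlist]
  cases hF : (((PySem.List.pyRange 0 100 1).flatMap (fun i =>
      (PySem.List.pyRange 0 100 1).map (fun k => (i, k)))).reverse.find?
      (fun ik => (pvResidues enc.toList).all
        (fun p => PySem.Int.mod ((p - ik.2) * ik.1) 26 == p))) with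
  | some ik => rfl
  | none => rfl
-- ===== VERDICT (by name: the statement is the Claim_ definition above) =====
theorem find_number_of_encryption_a_spec : Claim_equal_find_number_of_encryption_a := by
  intro enc dec _
  unfold Spec_find_number_of_encryption_a
  exact pv_main enc dec
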